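-- pv_equiv track=rewrite | github.com/nbrahman/HackerRank | 01 Algorithms/10 Bit Manipulation/The-Great-XOR.py | theGreatXor
-- ===== SOURCE A (Python) =====
-- def theGreatXor(x):
--     # Complete this function
--     b = format(x, 'b')
--     l = len(b)-1
--     s = 0
--     for i in range(len(b)):
--         if b[i]=='0':
--             s += 2 ** (l - i)
--     return s
-- ===== SOURCE B (Python) =====
-- def theGreatXor(x):
--     m = abs(x)
--     return (1 << m.bit_length()) - 1 - m
-- ===== Notes on version B (the rewrite author's own statement) =====
-- stated objective: simpler
-- what changed: Replaces the loop over the characters of the binary string by a closed form: two to the power bit_length(|x|), minus one, minus |x|, which equals the sum of powers of two over the cleared bit positions of |x|.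
-- intended difference: For x = 0, A returns one because format(0,'b') is the single-character string '0' and that character counts as a cleared bit; B returns zero, the intended value since zero has no cleared bits below a set bit. — e.g. on theGreatXor(0): A returns 1, B returns 0
import Mathlib
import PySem

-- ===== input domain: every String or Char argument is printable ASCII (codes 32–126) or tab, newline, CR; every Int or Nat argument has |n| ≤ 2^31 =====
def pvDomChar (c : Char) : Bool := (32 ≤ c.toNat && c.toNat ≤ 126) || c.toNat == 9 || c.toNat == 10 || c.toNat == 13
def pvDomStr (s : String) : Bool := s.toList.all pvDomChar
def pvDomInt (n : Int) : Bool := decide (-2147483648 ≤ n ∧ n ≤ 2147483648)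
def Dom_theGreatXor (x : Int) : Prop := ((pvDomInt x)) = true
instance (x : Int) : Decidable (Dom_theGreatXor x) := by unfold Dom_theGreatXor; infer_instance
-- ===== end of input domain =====

-- B replaces A's per-character loop over format(x,'b') by the closed form 2^bit_length(|x|)-1-|x| (simpler); for x = 0 A's value (one) is an
-- artefact of format(0,'b') being the string '0' and B returns the intended value zero (see D_ below).

-- ===== PORT A =====
-- binary digits of n, most significant first; empty for n = 0 (the n = 0 case is handled in pvFormatB)
def pvBinChars (n : Nat) : List Char :=
  if h : n = 0 then [] else pvBinChars (n / 2) ++ [if n % 2 = 1 then '1' else '0']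
decreasing_by exact Nat.div_lt_self (Nat.pos_of_ne_zero h) (by norm_num)

-- hand port of format(x, 'b'): minimal binary digits, '-' sign for negative x, '0' for zero (exact for all ints)
def pvFormatB (x : Int) : List Char :=
  if x < 0 then '-' :: pvBinChars (-x).toNat
  else if x = 0 then ['0'] else pvBinChars x.toNat

def theGreatXor (x : Int) : Int :=
  let b := pvFormatB x
  let l : Int := (b.length : Int) - 1
  -- for i in range(len(b)): if b[i]=='0': s += 2 ** (l - i); the exponent l - i is ≥ 0 for every i the
  -- range produces, so .toNat is exact here (it is an exponent, not an index)
  (PySem.List.pyRange 0 (b.length : Int) 1).foldl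
    (fun s i => if PySem.List.pyGet? b i = some '0' then s + 2 ^ (l - i).toNat else s) 0

-- ===== PORT B =====
-- hand port of int.bit_length for n ≥ 0 (exact): number of binary digits, 0 for n = 0
def pvBitLength (n : Nat) : Nat :=
  if h : n = 0 then 0 else pvBitLength (n / 2) + 1
decreasing_by exact Nat.div_lt_self (Nat.pos_of_ne_zero h) (by norm_num)

def theGreatXor_alt (x : Int) : Int :=
  let m := x.natAbs
  (2 : Int) ^ pvBitLength m - 1 - (m : Int)

-- ===== PRECONDITION & SPEC =====
-- For x = 0, A returns one because format(0,'b') is the single-character string '0' and that character counts as a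
-- cleared bit; B returns zero, the intended value, since zero has no cleared bits below a set bit.
def D_theGreatXor (x : Int) : Prop := x = 0
instance (x : Int) : Decidable (D_theGreatXor x) := by unfold D_theGreatXor; infer_instance

def Spec_theGreatXor (x : Int) (out : Int) : Prop := ¬ D_theGreatXor x → out = theGreatXor_alt x
instance (x : Int) (out : Int) : Decidable (Spec_theGreatXor x out) := by unfold Spec_theGreatXor; infer_instance

def pvDiffWitness_theGreatXor : Int := 0
def pvDiffWitnessOut_theGreatXor : Int × Int := (1, 0)

-- ===== CLAIM (what is proved, stated in full; the proofs are below) =====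
def Claim_unchanged_theGreatXor : Prop := ∀ (x : Int), Dom_theGreatXor x → Spec_theGreatXor x (theGreatXor x)
def Claim_changed_theGreatXor : Prop := Dom_theGreatXor (pvDiffWitness_theGreatXor) ∧ D_theGreatXor (pvDiffWitness_theGreatXor) ∧ theGreatXor (pvDiffWitness_theGreatXor) = pvDiffWitnessOut_theGreatXor.1 ∧ theGreatXor_alt (pvDiffWitness_theGreatXor) = pvDiffWitnessOut_theGreatXor.2 ∧ pvDiffWitnessOut_theGreatXor.1 ≠ pvDiffWitnessOut_theGreatXor.2
def Claim_exact_theGreatXor : Prop := ∀ (x : Int), Dom_theGreatXor x → D_theGreatXor x → theGreatXor x ≠ theGreatXor_alt x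

-- ===== LEMMAS AND PROOFS =====

-- Horner evaluation of the '0'-indicator bits of a character list
def pvG (b : List Char) : Int :=
  b.foldl (fun s c => 2 * s + (if c = '0' then 1 else 0)) 0

theorem pvG_append_singleton (ys : List Char) (c : Char) :
    pvG (ys ++ [c]) = 2 * pvG ys + (if c = '0' then 1 else 0) := by
  simp [pvG, List.foldl_append]

-- A's indexed loop, with the exponents shifted by k, equals 2^k times the Horner value
theorem pv_fold_shift (b : List Char) (k : Nat) (acc : Int) :
    (PySem.List.pyRange 0 (b.length : Int) 1).foldl
      (fun s i => if PySem.List.pyGet? b i = some '0'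
        then s + 2 ^ (((b.length : Int) - 1 - i).toNat + k) else s) acc
    = acc + 2 ^ k * pvG b := by
  induction b using List.reverseRecOn generalizing k acc with
  | nil => simp [pvG, PySem.List.pyRange_one_eq_nil]
  | append_singleton ys c ih =>
    have hn : ((ys ++ [c]).length : Int) = (ys.length : Int) + 1 := by
      simp
    rw [hn, PySem.List.pyRange_one_succ_right (by positivity), List.foldl_append]
    have hcongr :
        (PySem.List.pyRange 0 (ys.length : Int) 1).foldl
          (fun s i => if PySem.List.pyGet? (ys ++ [c]) i = some '0'
            then s + 2 ^ (((ys.length : Int) + 1 - 1 - i).toNat + k) else s) acc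
        = (PySem.List.pyRange 0 (ys.length : Int) 1).foldl
          (fun s i => if PySem.List.pyGet? ys i = some '0'
            then s + 2 ^ (((ys.length : Int) - 1 - i).toNat + (k + 1)) else s) acc := by
      apply PySem.List.foldl_congr_mem
      intro s i hi
      have hmem := (PySem.List.mem_pyRange_one).1 hi
      have h0 : 0 ≤ i := hmem.1
      have hlt : i < (ys.length : Int) := hmem.2
      have hget : PySem.List.pyGet? (ys ++ [c]) i = PySem.List.pyGet? ys i := by
        rw [PySem.List.pyGet?_of_nonneg _ h0, PySem.List.pyGet?_of_nonneg _ h0]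
        have : i.toNat < ys.length := by omega
        rw [List.getElem?_append_left this]
      have hexp : ((ys.length : Int) + 1 - 1 - i).toNat + k
          = ((ys.length : Int) - 1 - i).toNat + (k + 1) := by omega
      rw [hget, hexp]
    rw [hcongr, ih (k + 1) acc]
    have hlast : PySem.List.pyGet? (ys ++ [c]) (ys.length : Int) = some c := by
      rw [PySem.List.pyGet?_of_nonneg _ (by positivity)]
      simp
    rw [pvG_append_singleton]
    have hexp0 : (((ys.length : Int) + 1 - 1 - (ys.length : Int)).toNat + k) = k := by omega
    simp only [List.foldl_cons, List.foldl_nil, hlast, hexp0]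
    by_cases hc : c = '0' <;> simp [hc] <;> ring

-- with k = 0: A's loop over any character list is the Horner value of its '0'-indicators
theorem pv_fold_eq_pvG (b : List Char) :
    (PySem.List.pyRange 0 (b.length : Int) 1).foldl
      (fun s i => if PySem.List.pyGet? b i = some '0'
        then s + 2 ^ (((b.length : Int) - 1 - i).toNat) else s) 0
    = pvG b := by
  have h := pv_fold_shift b 0 0
  simpa using h

theorem pvG_binChars (n : Nat) :
    pvG (pvBinChars n) = 2 ^ (pvBinChars n).length - 1 - (n : Int) := by
  induction n using Nat.strong_induction_on with
  | _ n ih =>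
    rw [pvBinChars]
    by_cases h : n = 0
    · simp [h, pvG]
    · simp only [h, dite_false]
      rw [pvG_append_singleton, ih (n / 2) (Nat.div_lt_self (Nat.pos_of_ne_zero h) (by norm_num))]
      have hmod : n % 2 = 0 ∨ n % 2 = 1 := Nat.mod_two_eq_zero_or_one n
      have hdiv : n = 2 * (n / 2) + n % 2 := (Nat.div_add_mod n 2).symm.trans (by ring)
      have hlen : ((pvBinChars (n / 2)) ++ [if n % 2 = 1 then '1' else '0']).length
          = (pvBinChars (n / 2)).length + 1 := by simp
      rw [hlen]
      rcases hmod with hm | hm <;>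
        · simp only [hm]
          norm_num
          push_cast
          rw [pow_succ]
          omega

theorem pv_length_binChars (n : Nat) : (pvBinChars n).length = pvBitLength n := by
  induction n using Nat.strong_induction_on with
  | _ n ih =>
    rw [pvBinChars, pvBitLength]
    by_cases h : n = 0
    · simp [h]
    · simp only [h, dite_false]
      rw [List.length_append, ih (n / 2) (Nat.div_lt_self (Nat.pos_of_ne_zero h) (by norm_num))]
      simp

theorem pv_A_zero : theGreatXor 0 = 1 := by
  have h := pv_fold_eq_pvG ['0']
  simp only [theGreatXor, pvFormatB]
  norm_num
  simpa [pvG] using h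

theorem pv_alt_zero : theGreatXor_alt 0 = 0 := by
  simp only [theGreatXor_alt]
  rw [pvBitLength]
  simp

-- ===== VERDICT (by name: the statement is the Claim_ definition above) =====
theorem theGreatXor_spec : Claim_unchanged_theGreatXor := by
  intro x _ hD
  have hx : x ≠ 0 := hD
  show theGreatXor x = theGreatXor_alt x
  rcases lt_trichotomy x 0 with hneg | hzero | hpos
  · -- x < 0: b = '-' :: pvBinChars (-x).toNat
    have hfmt : pvFormatB x = '-' :: pvBinChars (-x).toNat := by
      simp [pvFormatB, hneg]
    have hG : pvG ('-' :: pvBinChars (-x).toNat) = pvG (pvBinChars (-x).toNat) := by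
      simp [pvG]
    have habs : (-x).toNat = x.natAbs := by omega
    simp only [theGreatXor, theGreatXor_alt, hfmt]
    rw [pv_fold_eq_pvG ('-' :: pvBinChars (-x).toNat), hG, pvG_binChars,
      pv_length_binChars, habs]
  · exact absurd hzero hx
  · -- x > 0
    have hfmt : pvFormatB x = pvBinChars x.toNat := by
      simp [pvFormatB, not_lt.mpr (le_of_lt hpos), hx]
    have habs : x.toNat = x.natAbs := by omega
    simp only [theGreatXor, theGreatXor_alt, hfmt]
    rw [pv_fold_eq_pvG, pvG_binChars, pv_length_binChars, habs]

theorem theGreatXor_changed : Claim_changed_theGreatXor := by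
  unfold Claim_changed_theGreatXor
  exact ⟨by decide, rfl, pv_A_zero, pv_alt_zero, by decide⟩

theorem theGreatXor_tight : Claim_exact_theGreatXor := by
  intro x _ hD
  subst hD
  rw [pv_A_zero, pv_alt_zero]
  decide
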